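-- pv_equiv track=rewrite | github.com/MrBrantCode/unitest_baseline | mut_generate/mist_train_cf/cf_89823/solution.py | count_max_occurrences
-- ===== SOURCE A (Python) =====
-- def count_max_occurrences(arr):
--     max_val = float('-inf')
--     max_count = 0
--
--     for row in arr:
--         for num in row:
--             if num > max_val:
--                 max_val = num
--                 max_count = 1
--             elif num == max_val:
--                 max_count += 1
--
--     return max_count
-- ===== SOURCE B (Python) =====
-- def count_max_occurrences(arr):
--     flat = [num for row in arr for num in row]
--     if not flat:
--         return 0
--     m = max(flat)
--     return flat.count(m)
-- ===== Notes on version B (the rewrite author's own statement) =====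
-- stated objective: simpler
-- what changed: Replaces A's single fused scan maintaining a running (max, count) pair with branch-ordered updates by a flatten-then-max-then-count decomposition: flatten once, take max() in one pass, count it with .count() in another.
import Mathlib
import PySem

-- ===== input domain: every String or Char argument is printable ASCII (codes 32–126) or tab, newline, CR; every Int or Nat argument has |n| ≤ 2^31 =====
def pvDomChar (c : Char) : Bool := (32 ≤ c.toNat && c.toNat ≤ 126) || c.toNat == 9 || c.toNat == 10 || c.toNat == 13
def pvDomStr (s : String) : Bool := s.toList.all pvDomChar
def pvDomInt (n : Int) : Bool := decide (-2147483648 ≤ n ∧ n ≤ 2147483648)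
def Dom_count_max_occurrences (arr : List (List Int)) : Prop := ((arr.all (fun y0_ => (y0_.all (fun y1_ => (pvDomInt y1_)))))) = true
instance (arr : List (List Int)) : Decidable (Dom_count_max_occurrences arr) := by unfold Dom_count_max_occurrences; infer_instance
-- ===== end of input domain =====

-- B replaces A's fused running-(max,count) scan by flatten, then max, then count (objective: simpler).

-- ===== PORT A =====
-- state: (max_val, max_count); max_val = none models float('-inf'), which every int exceeds
def cmoStepA (st : Option Int × Int) (num : Int) : Option Int × Int :=
  match st.1 with
  | none => (some num, 1)
  | some m =>
    if num > m then (some num, 1)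
    else if num == m then (st.1, st.2 + 1)
    else st

def count_max_occurrences (arr : List (List Int)) : Int :=
  (arr.foldl (fun st row => row.foldl cmoStepA st) ((none : Option Int), (0 : Int))).2

-- ===== PORT B =====
def count_max_occurrences_alt (arr : List (List Int)) : Int :=
  let flat := arr.flatMap (fun row => row)
  match PySem.List.max? flat (fun x => x) with
  | none => 0
  | some m => (PySem.List.count flat m : Int)

-- ===== PRECONDITION & SPEC =====
def Spec_count_max_occurrences (arr : List (List Int)) (out : Int) : Prop := out = count_max_occurrences_alt arr
instance (arr : List (List Int)) (out : Int) : Decidable (Spec_count_max_occurrences arr out) := by unfold Spec_count_max_occurrences; infer_instance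

-- ===== CLAIM (what is proved, stated in full; the proofs are below) =====
def Claim_equal_count_max_occurrences : Prop := ∀ (arr : List (List Int)), Dom_count_max_occurrences arr → Spec_count_max_occurrences arr (count_max_occurrences arr)

-- ===== LEMMAS AND PROOFS =====

-- the nested foldl over rows is the foldl over the flattened list
theorem cmo_foldl_flatMap (arr : List (List Int)) (st : Option Int × Int) :
    arr.foldl (fun st row => row.foldl cmoStepA st) st
      = (arr.flatMap (fun row => row)).foldl cmoStepA st := by
  induction arr generalizing st with
  | nil => rfl
  | cons r t ih => simp [List.foldl_cons, List.flatMap_cons, List.foldl_append, ih]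

-- needed by cmo_loop: a list's running max is ≥ its seed
theorem pv_le_foldl_max_self (m : Int) (t : List Int) : m ≤ t.foldl max m := by
  induction t generalizing m with
  | nil => simp
  | cons x t ih => exact le_trans (le_max_left m x) (ih (max m x))

-- loop invariant: from state (some m, c) the scan returns the running max and A's count rule
theorem cmo_loop (xs : List Int) (m : Int) (c : Int) :
    xs.foldl cmoStepA (some m, c)
      = (some (xs.foldl max m),
         if xs.foldl max m = m then c + (xs.count m : Int) else (xs.count (xs.foldl max m) : Int)) := by
  induction xs generalizing m c with
  | nil => simp
  | cons x t ih =>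
    simp only [List.foldl_cons, List.count_cons]
    by_cases hgt : x > m
    · have hmx : max m x = x := by omega
      rw [show cmoStepA (some m, c) x = (some x, 1) by simp [cmoStepA, hgt]]
      rw [ih, hmx]
      have hle : x ≤ t.foldl max x := pv_le_foldl_max_self ..
      by_cases hx : t.foldl max x = x
      · have hxm : ¬ (x = m) := by omega
        simp [hx, hxm]
        omega
      · have hne : t.foldl max x ≠ m := by omega
        have hne2 : ¬ (x = t.foldl max x) := fun h => hx h.symm
        simp [hx, hne, hne2]
    · have hmx : max m x = m := by omega
      by_cases heq : x = m
      · rw [show cmoStepA (some m, c) x = (some m, c + 1) by simp [cmoStepA, hgt, heq]]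
        rw [ih, hmx]
        by_cases hM : t.foldl max m = m
        · simp [hM, heq]; ring
        · have : ¬ (x = t.foldl max m) := by rw [heq]; exact fun h => hM h.symm
          simp [hM, this]
      · rw [show cmoStepA (some m, c) x = (some m, c) by simp [cmoStepA, hgt, heq]]
        rw [ih, hmx]
        have hle : m ≤ t.foldl max m := pv_le_foldl_max_self ..
        by_cases hM : t.foldl max m = m
        · simp [hM, heq]
        · have : ¬ (x = t.foldl max m) := by intro h; apply hgt; omega
          simp [hM, this]

-- ===== VERDICT (by name: the statement is the Claim_ definition above) =====
theorem count_max_occurrences_spec : Claim_equal_count_max_occurrences := by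
  intro arr _
  unfold Spec_count_max_occurrences count_max_occurrences count_max_occurrences_alt
  rw [cmo_foldl_flatMap]
  cases h : arr.flatMap (fun row => row) with
  | nil => simp [PySem.List.max?]
  | cons x t =>
    simp only [List.foldl_cons, PySem.List.max?_id_cons]
    rw [show cmoStepA ((none : Option Int), (0:Int)) x = (some x, 1) from rfl, cmo_loop]
    rw [PySem.List.count_eq]
    by_cases hx : t.foldl max x = x
    · simp [hx]
      omega
    · have : ¬ (x = t.foldl max x) := fun h => hx h.symm
      simp [hx, this]
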